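-- pv_equiv track=rewrite | github.com/Nirvazure/MyScriptTry | ForJob/奇安信1.py | tackle
-- ===== SOURCE A (Python) =====
-- def tackle(k: int, a: list)->int:
--     ans = 1000
--     a = sorted(a)
--     i = 0
--     j = len(a)-1
--     while(i <= j):
--         cha = abs((a[i]+k)-(a[j]-k))
--         if(cha < ans):
--             ans = cha
--         i += 1
--         j -= 1
--     return ans
-- ===== SOURCE B (Python) =====
-- def tackle(k: int, a: list) -> int:
--     # Binary search over the monotone (non-increasing) symmetric-difference
--     # sequence instead of a linear min-scan.
--     s = sorted(a)
--     n = len(s)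
--     m = (n + 1) // 2
--     if m == 0:
--         return 1000
--     d = [s[n - 1 - i] - s[i] for i in range(m)]  # non-increasing
--     t = 2 * k
--     lo, hi = 0, m  # find first index with d[index] <= t
--     while lo < hi:
--         mid = (lo + hi) // 2
--         if d[mid] <= t:
--             hi = mid
--         else:
--             lo = mid + 1
--     best = 1000
--     if lo < m:
--         best = min(best, t - d[lo])
--     if lo > 0:
--         best = min(best, d[lo - 1] - t)
--     return best
-- ===== Notes on version B (the rewrite author's own statement) =====
-- stated objective: alternative
-- what changed: Replaces the linear two-pointer min-scan with building the non-increasing symmetric-difference sequence once and binary-searching it for 2*k, comparing only the two crossing candidates.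
import Mathlib
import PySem

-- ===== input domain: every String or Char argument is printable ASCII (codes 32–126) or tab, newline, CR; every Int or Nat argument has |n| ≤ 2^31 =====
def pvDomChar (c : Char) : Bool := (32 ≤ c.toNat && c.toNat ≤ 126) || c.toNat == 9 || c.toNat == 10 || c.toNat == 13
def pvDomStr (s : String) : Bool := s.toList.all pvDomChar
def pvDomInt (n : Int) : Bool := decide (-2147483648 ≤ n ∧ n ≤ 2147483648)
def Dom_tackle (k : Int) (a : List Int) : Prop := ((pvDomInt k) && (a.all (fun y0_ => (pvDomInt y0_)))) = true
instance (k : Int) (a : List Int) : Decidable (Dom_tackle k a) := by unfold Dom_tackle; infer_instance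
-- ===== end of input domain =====

-- B replaces A's linear two-pointer min-scan by building the non-increasing
-- symmetric-difference sequence and binary-searching it for 2*k (objective: alternative).

-- ===== PORT A =====
-- fuel = list length bounds the number of iterations of A's while loop (structural totality device)
def tackleLoop (s : List Int) (k : Int) (fuel : Nat) (i j ans : Int) : Int :=
  match fuel with
  | 0 => ans
  | fuel + 1 =>
    if i ≤ j then
      let cha := |((PySem.List.pyGetD s i 0) + k) - ((PySem.List.pyGetD s j 0) - k)|
      let ans' := if cha < ans then cha else ans
      tackleLoop s k fuel (i + 1) (j - 1) ans'
    else ans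

def tackle (k : Int) (a : List Int) : Int :=
  let s := PySem.List.sorted a (fun x => x) false
  tackleLoop s k s.length 0 ((s.length : Int) - 1) 1000

-- ===== PORT B =====
-- fuel = hi - lo bounds the number of bisection steps (structural totality device)
def tackleSearch (d : List Int) (t : Int) (fuel : Nat) (lo hi : Nat) : Nat :=
  match fuel with
  | 0 => lo
  | fuel + 1 =>
    if lo < hi then
      let mid := (lo + hi) / 2
      if d.getD mid 0 ≤ t then tackleSearch d t fuel lo mid
      else tackleSearch d t fuel (mid + 1) hi
    else lo

def tackle_alt (k : Int) (a : List Int) : Int :=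
  let s := PySem.List.sorted a (fun x => x) false
  let n := s.length
  let m := (n + 1) / 2
  if m = 0 then 1000
  else
    let d := (List.range m).map (fun i => s.getD (n - 1 - i) 0 - s.getD i 0)
    let t := 2 * k
    let lo := tackleSearch d t m 0 m
    let best1 := if lo < m then min 1000 (t - d.getD lo 0) else (1000 : Int)
    if 0 < lo then min best1 (d.getD (lo - 1) 0 - t) else best1

-- ===== PRECONDITION & SPEC =====
def Spec_tackle (k : Int) (a : List Int) (out : Int) : Prop := out = tackle_alt k a
instance (k : Int) (a : List Int) (out : Int) : Decidable (Spec_tackle k a out) := by unfold Spec_tackle; infer_instance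

-- ===== CLAIM (what is proved, stated in full; the proofs are below) =====
def Claim_equal_tackle : Prop := ∀ (k : Int) (a : List Int), Dom_tackle k a → Spec_tackle k a (tackle k a)

-- ===== LEMMAS AND PROOFS =====

-- the symmetric difference at index j of a list s
def dv (s : List Int) (j : Nat) : Int := s.getD (s.length - 1 - j) 0 - s.getD j 0

theorem getD_mono_of_pairwise (s : List Int) (hs : s.Pairwise (· ≤ ·))
    {p q : Nat} (hpq : p ≤ q) (hq : q < s.length) :
    s.getD p 0 ≤ s.getD q 0 := by
  rcases Nat.eq_or_lt_of_le hpq with h | h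
  · subst h; exact le_refl _
  · rw [List.getD_eq_getElem _ _ (lt_of_le_of_lt hpq hq), List.getD_eq_getElem _ _ hq]
    exact (List.pairwise_iff_getElem.mp hs) p q _ _ h

theorem dv_anti (s : List Int) (hs : s.Pairwise (· ≤ ·))
    {p q : Nat} (hpq : p ≤ q) (hq : q < (s.length + 1) / 2) :
    dv s q ≤ dv s p := by
  unfold dv
  have hqlen : q < s.length := by omega
  have h1 : s.getD p 0 ≤ s.getD q 0 := getD_mono_of_pairwise s hs hpq hqlen
  have h2 : s.getD (s.length - 1 - q) 0 ≤ s.getD (s.length - 1 - p) 0 :=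
    getD_mono_of_pairwise s hs (by omega) (by omega)
  omega

theorem loopA (s : List Int) (k : Int) (fuel i : Nat) (ans : Int)
    (hi : i ≤ (s.length + 1) / 2) (hfuel : (s.length + 1) / 2 - i ≤ fuel) :
    tackleLoop s k fuel (i : Int) ((s.length : Int) - 1 - (i : Int)) ans
      = (List.range' i ((s.length + 1) / 2 - i)).foldl
          (fun acc j => min acc |2 * k - dv s j|) ans := by
  induction fuel generalizing i ans with
  | zero =>
    have h : i = (s.length + 1) / 2 := by omega
    rw [tackleLoop, h, Nat.sub_self, List.range']
    rfl
  | succ fuel ih =>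
  rcases Nat.eq_or_lt_of_le hi with h | h
  · rw [tackleLoop]
    have hcond : ¬ ((i : Int) ≤ (s.length : Int) - 1 - (i : Int)) := by omega
    rw [if_neg hcond, h, Nat.sub_self, List.range']
    rfl
  · have hn1 : i ≤ s.length - 1 := by omega
    have hstep : (s.length + 1) / 2 - i = ((s.length + 1) / 2 - (i + 1)) + 1 := by omega
    rw [tackleLoop]
    have hcond : ((i : Int) ≤ (s.length : Int) - 1 - (i : Int)) := by omega
    rw [if_pos hcond]
    have hj : (s.length : Int) - 1 - (i : Int) = ((s.length - 1 - i : Nat) : Int) := by omega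
    have habs : |PySem.List.pyGetD s (i:Int) 0 + k - (PySem.List.pyGetD s ((s.length:Int) - 1 - (i:Int)) 0 - k)|
        = |2 * k - dv s i| := by
      rw [hj, PySem.List.pyGetD_natCast, PySem.List.pyGetD_natCast]
      unfold dv
      congr 1
      ring
    have hmin : ∀ (cha : Int), (if cha < ans then cha else ans) = min ans cha := by
      intro cha; rcases lt_or_ge cha ans with h' | h'
      · rw [if_pos h', min_eq_right (le_of_lt h')]
      · rw [if_neg (not_lt.mpr h'), min_eq_left h']
    simp only [habs, hmin]
    have hcast : (i : Int) + 1 = ((i + 1 : Nat) : Int) := by push_cast; ring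
    have hcast2 : (s.length : Int) - 1 - (i : Int) - 1 = (s.length : Int) - 1 - ((i + 1 : Nat) : Int) := by
      push_cast; ring
    rw [hcast2, hcast, ih (i+1) _ (by omega) (by omega), hstep, List.range'_succ]
    rfl

theorem foldl_min_le_init (f : Nat → Int) (l : List Nat) (ans : Int) :
    l.foldl (fun acc x => min acc (f x)) ans ≤ ans := by
  induction l generalizing ans with
  | nil => simp
  | cons x xs ih => exact le_trans (ih _) (min_le_left _ _)

theorem foldl_min_le_mem (f : Nat → Int) (l : List Nat) (ans : Int) {x : Nat} (hx : x ∈ l) :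
    l.foldl (fun acc y => min acc (f y)) ans ≤ f x := by
  induction l generalizing ans with
  | nil => simp at hx
  | cons y ys ih =>
    rcases List.mem_cons.mp hx with h | h
    · subst h; exact le_trans (foldl_min_le_init f ys _) (min_le_right _ _)
    · exact ih _ h

theorem le_foldl_min (f : Nat → Int) (l : List Nat) (ans c : Int)
    (hc : c ≤ ans) (h : ∀ x ∈ l, c ≤ f x) :
    c ≤ l.foldl (fun acc x => min acc (f x)) ans := by
  induction l generalizing ans with
  | nil => simpa
  | cons x xs ih =>
    exact ih _ (le_min hc (h x (List.mem_cons_self))) (fun y hy => h y (List.mem_cons_of_mem _ hy))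

theorem search_spec (d : List Int) (t : Int)
    (hmono : ∀ p q : Nat, p ≤ q → q < d.length → d.getD q 0 ≤ d.getD p 0)
    (fuel lo hi : Nat) (h1 : lo ≤ hi) (h2 : hi ≤ d.length) (hfuel : hi - lo ≤ fuel)
    (h3 : ∀ i < lo, t < d.getD i 0)
    (h4 : ∀ i, hi ≤ i → i < d.length → d.getD i 0 ≤ t) :
    lo ≤ tackleSearch d t fuel lo hi ∧ tackleSearch d t fuel lo hi ≤ hi ∧
    (∀ i < tackleSearch d t fuel lo hi, t < d.getD i 0) ∧
    (∀ i, tackleSearch d t fuel lo hi ≤ i → i < d.length → d.getD i 0 ≤ t) := by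
  induction fuel generalizing lo hi with
  | zero =>
    have h : lo = hi := by omega
    rw [tackleSearch]
    exact ⟨le_refl _, h1, h3, fun i hri hil => h4 i (by omega) hil⟩
  | succ fuel ih =>
  rw [tackleSearch]
  by_cases hlt : lo < hi
  · rw [if_pos hlt]
    set mid := (lo + hi) / 2 with hmid
    have hmlo : lo ≤ mid := by omega
    have hmhi : mid < hi := by omega
    by_cases hle : d.getD mid 0 ≤ t
    · rw [if_pos hle]
      have h4' : ∀ i, mid ≤ i → i < d.length → d.getD i 0 ≤ t := by
        intro i hmi hil
        exact le_trans (hmono mid i hmi hil) hle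
      have := ih lo mid hmlo (by omega) (by omega) h3 h4'
      exact ⟨this.1, by omega, this.2.2.1, this.2.2.2⟩
    · rw [if_neg hle]
      rw [not_le] at hle
      have h3' : ∀ i < mid + 1, t < d.getD i 0 := by
        intro i hi
        exact lt_of_lt_of_le hle (hmono i mid (by omega) (by omega))
      have := ih (mid + 1) hi (by omega) h2 (by omega) h3' h4
      exact ⟨by omega, this.2.1, this.2.2.1, this.2.2.2⟩
  · rw [if_neg hlt]
    exact ⟨le_refl _, (by omega), h3, fun i hri hil => h4 i (by omega) hil⟩

theorem B_eq_fold (k : Int) (a : List Int) :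
    tackle_alt k a
      = (List.range' 0 (((PySem.List.sorted a (fun x => x) false).length + 1) / 2)).foldl
          (fun acc j => min acc |2 * k - dv (PySem.List.sorted a (fun x => x) false) j|) 1000 := by
  have hs : (PySem.List.sorted a (fun x => x) false).Pairwise (· ≤ ·) :=
    PySem.List.sorted_pairwise a (fun x => x)
  simp only [tackle_alt]
  generalize hgen : PySem.List.sorted a (fun x => x) false = s at hs ⊢
  by_cases hm : (s.length + 1) / 2 = 0
  · rw [if_pos hm, hm]
    rfl
  · rw [if_neg hm]
    set n := s.length with hn
    set m := (n + 1) / 2 with hmdef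
    set t := 2 * k with ht
    set D := (List.range m).map (fun i => s.getD (n - 1 - i) 0 - s.getD i 0) with hDdef
    have hDlen : D.length = m := by simp [hDdef]
    have hDget : ∀ j < m, D.getD j 0 = dv s j := by
      intro j hj
      rw [hDdef, List.getD_eq_getElem _ _ (by simpa using hj)]
      simp [dv, hn]
    have hmono : ∀ p q : Nat, p ≤ q → q < D.length → D.getD q 0 ≤ D.getD p 0 := by
      intro p q hpq hq
      rw [hDlen] at hq
      rw [hDget q hq, hDget p (by omega)]
      exact dv_anti s hs hpq hq
    obtain ⟨hr0, hrm, H1, H2⟩ := search_spec D t hmono m 0 m (Nat.zero_le _) (by omega) (by omega)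
      (by intro i hi; omega) (by intro i h1 h2; omega)
    set r := tackleSearch D t m 0 m with hrdef
    apply le_antisymm
    · -- B's best ≤ fold
      refine le_foldl_min (fun j => |t - dv s j|) (List.range' 0 m) 1000 _ ?_ ?_
      · -- best ≤ 1000
        by_cases hrm' : r < m
        · rw [if_pos hrm']
          by_cases hr' : 0 < r
          · rw [if_pos hr']; exact le_trans (min_le_left _ _) (min_le_left _ _)
          · rw [if_neg hr']; exact min_le_left _ _
        · rw [if_neg hrm']
          rw [if_pos (by omega : 0 < r)]
          exact min_le_left _ _
      · intro j hj
        rw [List.mem_range'] at hj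
        have hjm : j < m := by omega
        by_cases hjr : j < r
        · have hr' : 0 < r := by omega
          have hdj : t < dv s j := by
            have := H1 j hjr
            rwa [hDget j hjm] at this
          have habs : |t - dv s j| = dv s j - t := by
            rw [abs_of_nonpos (by omega)]; ring
          simp only [habs]
          have hanti : dv s (r - 1) ≤ dv s j := dv_anti s hs (by omega) (by omega)
          have hbest : (if 0 < r then
              min (if r < m then min 1000 (t - D.getD r 0) else (1000:Int)) (D.getD (r-1) 0 - t)
              else (if r < m then min 1000 (t - D.getD r 0) else (1000:Int))) ≤ D.getD (r-1) 0 - t := by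
            rw [if_pos hr']; exact min_le_right _ _
          refine le_trans hbest ?_
          rw [hDget (r - 1) (by omega)]
          omega
        · have hrm' : r < m := by omega
          have hdj : dv s j ≤ t := by
            have := H2 j (by omega) (by omega)
            rwa [hDget j hjm] at this
          have habs : |t - dv s j| = t - dv s j := abs_of_nonneg (by omega)
          simp only [habs]
          have hanti : dv s j ≤ dv s r := dv_anti s hs (by omega) (by omega)
          have hbest : (if 0 < r then
              min (if r < m then min 1000 (t - D.getD r 0) else (1000:Int)) (D.getD (r-1) 0 - t)
              else (if r < m then min 1000 (t - D.getD r 0) else (1000:Int))) ≤ t - D.getD r 0 := by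
            by_cases hr' : 0 < r
            · rw [if_pos hr', if_pos hrm']
              exact le_trans (min_le_left _ _) (min_le_right _ _)
            · rw [if_neg hr', if_pos hrm']
              exact min_le_right _ _
          refine le_trans hbest ?_
          rw [hDget r hrm']
          omega
    · -- fold ≤ B's best
      have hle1000 : (List.range' 0 m).foldl (fun acc j => min acc |t - dv s j|) 1000 ≤ 1000 :=
        foldl_min_le_init _ _ 1000
      by_cases hrm' : r < m
      · have hmem : r ∈ List.range' 0 m := by simp [List.mem_range']; omega
        have hdr : dv s r ≤ t := by
          have := H2 r (le_refl _) (by omega)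
          rwa [hDget r hrm'] at this
        have habs : |t - dv s r| = t - dv s r := abs_of_nonneg (by omega)
        have hf1 : (List.range' 0 m).foldl (fun acc j => min acc |t - dv s j|) 1000 ≤ t - dv s r := by
          simpa [habs] using foldl_min_le_mem (fun j => |t - dv s j|) (List.range' 0 m) 1000 hmem
        rw [if_pos hrm', hDget r hrm']
        by_cases hr' : 0 < r
        · rw [if_pos hr']
          have hmem' : r - 1 ∈ List.range' 0 m := by simp [List.mem_range']; omega
          have hdr' : t < dv s (r - 1) := by
            have := H1 (r - 1) (by omega)
            rwa [hDget (r - 1) (by omega)] at this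
          have habs' : |t - dv s (r - 1)| = dv s (r - 1) - t := by
            rw [abs_of_nonpos (by omega)]; ring
          have hf2 : (List.range' 0 m).foldl (fun acc j => min acc |t - dv s j|) 1000 ≤ dv s (r - 1) - t := by
            simpa [habs'] using foldl_min_le_mem (fun j => |t - dv s j|) (List.range' 0 m) 1000 hmem'
          rw [hDget (r - 1) (by omega)]
          exact le_min (le_min hle1000 hf1) hf2
        · rw [if_neg hr']
          exact le_min hle1000 hf1
      · rw [if_neg hrm']
        have hr' : 0 < r := by omega
        rw [if_pos hr']
        have hmem' : r - 1 ∈ List.range' 0 m := by simp [List.mem_range']; omega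
        have hdr' : t < dv s (r - 1) := by
          have := H1 (r - 1) (by omega)
          rwa [hDget (r - 1) (by omega)] at this
        have habs' : |t - dv s (r - 1)| = dv s (r - 1) - t := by
          rw [abs_of_nonpos (by omega)]; ring
        have hf2 : (List.range' 0 m).foldl (fun acc j => min acc |t - dv s j|) 1000 ≤ dv s (r - 1) - t := by
          simpa [habs'] using foldl_min_le_mem (fun j => |t - dv s j|) (List.range' 0 m) 1000 hmem'
        rw [hDget (r - 1) (by omega)]
        exact le_min hle1000 hf2

theorem A_eq_fold (k : Int) (a : List Int) :
    tackle k a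
      = (List.range' 0 (((PySem.List.sorted a (fun x => x) false).length + 1) / 2)).foldl
          (fun acc j => min acc |2 * k - dv (PySem.List.sorted a (fun x => x) false) j|) 1000 := by
  unfold tackle
  have := loopA (PySem.List.sorted a (fun x => x) false) k
    (PySem.List.sorted a (fun x => x) false).length 0 1000 (Nat.zero_le _) (by omega)
  simpa using this

-- ===== VERDICT (by name: the statement is the Claim_ definition above) =====
theorem tackle_spec : Claim_equal_tackle := by
  unfold Claim_equal_tackle Spec_tackle
  intro k a _
  rw [A_eq_fold, B_eq_fold]
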